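-- pv_equiv track=rewrite | github.com/asmitanegi/PerceptFence | src/src/screenshare_mediator/redaction.py | _redact_nonconsented_region
-- ===== SOURCE A (Python) =====
-- def _redact_nonconsented_region(text: str) -> str:
--     """Drop the explicitly non-consented pane while preserving consented content."""
--     lines = []
--     in_nonconsented_region = False
--     redaction_inserted = False
--     for line in text.splitlines():
--         if "RIGHT PANE" in line and "non-consented" in line.lower():
--             in_nonconsented_region = True
--             if not redaction_inserted:
--                 lines.append("[NON-CONSENTED REGION REDACTED]")
--                 redaction_inserted = True
--             continue
--         if in_nonconsented_region:
--             continue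
--         lines.append(line)
--     return "\n".join(lines)
-- ===== SOURCE B (Python) =====
-- def _redact_nonconsented_region(text: str) -> str:
--     """Drop the explicitly non-consented pane while preserving consented content."""
--     lines = text.splitlines()
--     out_rev = []
--     for line in reversed(lines):
--         if "RIGHT PANE" in line and "non-consented" in line.lower():
--             out_rev = ["[NON-CONSENTED REGION REDACTED]"]
--         else:
--             out_rev.append(line)
--     return "\n".join(reversed(out_rev))
-- ===== Notes on version B (the rewrite author's own statement) =====
-- stated objective: alternative
-- what changed: Replaced A's left-to-right pass with two booleans by a right-to-left traversal with a reset accumulator: walking the reversed lines, a marker line discards everything collected so far (the suffix) and restarts from the redaction marker, so no flags and no truncation index are needed.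
import Mathlib
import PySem

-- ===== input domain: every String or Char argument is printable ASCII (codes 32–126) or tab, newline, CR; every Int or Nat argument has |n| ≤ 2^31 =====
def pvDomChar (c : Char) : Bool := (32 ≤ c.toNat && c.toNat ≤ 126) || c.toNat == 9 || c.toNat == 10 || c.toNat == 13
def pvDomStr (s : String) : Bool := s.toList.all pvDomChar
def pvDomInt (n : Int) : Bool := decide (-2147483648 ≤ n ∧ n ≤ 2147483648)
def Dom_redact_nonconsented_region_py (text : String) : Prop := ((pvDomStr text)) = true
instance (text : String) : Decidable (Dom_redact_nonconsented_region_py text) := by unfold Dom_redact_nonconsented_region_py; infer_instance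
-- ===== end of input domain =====

-- B replaces A's flag-driven left-to-right pass by a right-to-left traversal whose accumulator is reset to the redaction marker at each marker line (alternative decomposition, same cost).

-- ===== PORT A =====
-- the marker test: "RIGHT PANE" in line and "non-consented" in line.lower()
def pvMarker (line : String) : Bool :=
  PySem.Str.isIn "RIGHT PANE" line && PySem.Str.isIn "non-consented" (PySem.Str.lower line)

-- loop body of A: state = (lines, in_nonconsented_region, redaction_inserted)
def pvStepA (st : List String × Bool × Bool) (line : String) : List String × Bool × Bool :=
  if pvMarker line then
    if !st.2.2 then (st.1 ++ ["[NON-CONSENTED REGION REDACTED]"], true, true)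
    else (st.1, true, true)
  else if st.2.1 then st
  else (st.1 ++ [line], st.2.1, st.2.2)

def redact_nonconsented_region_py (text : String) : String :=
  let r := (PySem.Str.splitlines text).foldl pvStepA ([], false, false)
  PySem.Str.join "\n" r.1

-- ===== PORT B =====
-- loop body of B: on a marker line the whole collected suffix is discarded
def pvStepB (acc : List String) (line : String) : List String :=
  if pvMarker line then ["[NON-CONSENTED REGION REDACTED]"] else acc ++ [line]

def redact_nonconsented_region_py_alt (text : String) : String :=
  let lines := PySem.Str.splitlines text
  let out_rev := lines.reverse.foldl pvStepB []
  PySem.Str.join "\n" out_rev.reverse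

-- ===== PRECONDITION & SPEC =====
def Spec_redact_nonconsented_region_py (text : String) (out : String) : Prop := out = redact_nonconsented_region_py_alt text
instance (text : String) (out : String) : Decidable (Spec_redact_nonconsented_region_py text out) := by unfold Spec_redact_nonconsented_region_py; infer_instance

-- ===== CLAIM (what is proved, stated in full; the proofs are below) =====
def Claim_equal_redact_nonconsented_region_py : Prop := ∀ (text : String), Dom_redact_nonconsented_region_py text → Spec_redact_nonconsented_region_py text (redact_nonconsented_region_py text)

-- ===== LEMMAS AND PROOFS =====

-- once both flags are set, A's loop appends nothing more
theorem pvFold_stop (ls : List String) (acc : List String) :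
    ls.foldl pvStepA (acc, true, true) = (acc, true, true) := by
  induction ls with
  | nil => rfl
  | cons l ls ih =>
      simp only [List.foldl_cons, pvStepA]
      by_cases h : pvMarker l = true <;> simp [h, ih]

-- from the fresh state, A's fold computes the reverse of B's right-to-left accumulation
theorem pvA_eq_foldr (ls : List String) (acc : List String) :
    (ls.foldl pvStepA (acc, false, false)).1 =
      acc ++ (ls.foldr (fun x r => pvStepB r x) []).reverse := by
  induction ls generalizing acc with
  | nil => simp
  | cons l ls ih =>
      by_cases h : pvMarker l = true
      · simp [List.foldl_cons, pvStepA, h, pvFold_stop, pvStepB]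
      · simp only [List.foldl_cons, pvStepA, h, Bool.false_eq_true, if_false, List.foldr_cons,
          pvStepB, ih (acc ++ [l])]
        simp

-- ===== VERDICT (by name: the statement is the Claim_ definition above) =====
theorem redact_nonconsented_region_py_spec : Claim_equal_redact_nonconsented_region_py := by
  intro text _
  unfold Spec_redact_nonconsented_region_py redact_nonconsented_region_py redact_nonconsented_region_py_alt
  simp only [List.foldl_reverse]
  rw [pvA_eq_foldr (PySem.Str.splitlines text) []]
  simp
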